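-- pv_equiv track=rewrite | github.com/ThreeHalflingsInATrenchcoat/project-euler | 023.py | sum_of_abundant
-- ===== SOURCE A (Python) =====
-- def sum_of_abundant(x,nums):
--     for i in range(0,len(nums)):
--         if(nums[i] > x):
--             return False
--         else:
--             for j in range(i, len(nums)):
--                 if(i + j == x):
--                     return True
-- ===== SOURCE B (Python) =====
-- def sum_of_abundant(x, nums):
--     # The inner scan for j reduces to direct arithmetic: it
--     # fires exactly when j = x - i lies in range(i, len(nums)).
--     n = len(nums)
--     for i, v in enumerate(nums):
--         if v > x:
--             return False
--         if i <= x - i < n: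
--             return True
-- ===== Notes on version B (the rewrite author's own statement) =====
-- stated objective: alternative
-- what changed: B replaces A's inner index scan with direct arithmetic: the inner loop fires exactly when j = x - i lies in range(i, len(nums)), so B does one pass with an O(1) range check instead of nested index loops.
import Mathlib
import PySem

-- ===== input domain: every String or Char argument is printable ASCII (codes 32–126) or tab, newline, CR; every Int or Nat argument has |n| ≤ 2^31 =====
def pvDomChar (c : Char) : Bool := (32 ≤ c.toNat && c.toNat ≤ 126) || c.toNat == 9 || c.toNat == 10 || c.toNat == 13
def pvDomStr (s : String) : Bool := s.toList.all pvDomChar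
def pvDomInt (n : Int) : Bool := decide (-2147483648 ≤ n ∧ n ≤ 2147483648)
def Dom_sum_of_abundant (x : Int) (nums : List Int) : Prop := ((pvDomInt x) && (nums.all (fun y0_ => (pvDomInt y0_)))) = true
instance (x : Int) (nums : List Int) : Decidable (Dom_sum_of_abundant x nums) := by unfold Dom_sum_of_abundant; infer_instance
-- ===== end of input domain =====

-- B replaces A's inner index scan by a direct range-membership check on j = x - i, one pass instead of nested loops (objective: alternative).

-- ===== PORT A =====
-- inner loop: for j in range(i, len(nums)): if i + j == x: return True
def sum_of_abundant_inner (x i : Int) : List Int → Option Bool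
  | [] => none
  | j :: js => if i + j = x then some true else sum_of_abundant_inner x i js

-- outer loop: for i in range(0, len(nums)): …
def sum_of_abundant_outer (x : Int) (nums : List Int) : List Int → Option Bool
  | [] => none
  | i :: is =>
    match PySem.List.pyGet? nums i with
    | none => none   -- unreachable: i ranges over valid indices
    | some v =>
      if v > x then some false
      else
        match sum_of_abundant_inner x i (PySem.List.pyRange i (nums.length : Int) 1) with
        | some b => some b
        | none => sum_of_abundant_outer x nums is

def sum_of_abundant (x : Int) (nums : List Int) : Option Bool :=
  sum_of_abundant_outer x nums (PySem.List.pyRange 0 (nums.length : Int) 1)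

-- ===== PORT B =====
-- for i, v in enumerate(nums): if v > x: return False; if i <= x - i < n: return True
def sum_of_abundant_alt_loop (x n : Int) : List (Int × Int) → Option Bool
  | [] => none
  | (i, v) :: rest =>
    if v > x then some false
    else if i ≤ x - i ∧ x - i < n then some true
    else sum_of_abundant_alt_loop x n rest

def sum_of_abundant_alt (x : Int) (nums : List Int) : Option Bool :=
  let n : Int := nums.length
  sum_of_abundant_alt_loop x n (PySem.List.enumerate nums 0)

-- ===== PRECONDITION & SPEC =====
def Spec_sum_of_abundant (x : Int) (nums : List Int) (out : Option Bool) : Prop := out = sum_of_abundant_alt x nums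
instance (x : Int) (nums : List Int) (out : Option Bool) : Decidable (Spec_sum_of_abundant x nums out) := by unfold Spec_sum_of_abundant; infer_instance

-- ===== CLAIM (what is proved, stated in full; the proofs are below) =====
def Claim_equal_sum_of_abundant : Prop := ∀ (x : Int) (nums : List Int), Dom_sum_of_abundant x nums → Spec_sum_of_abundant x nums (sum_of_abundant x nums)

-- ===== LEMMAS AND PROOFS =====

-- Reference: scan indices k, k+1, …; first event wins (nums[k] > x → false, checked before the hit condition).
def refRun (x : Int) (nums : List Int) (k : Nat) : Option Bool :=
  if h : k < nums.length then
    if nums[k] > x then some false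
    else if (k : Int) ≤ x - k ∧ x - k < (nums.length : Int) then some true
    else refRun x nums (k + 1)
  else none
termination_by nums.length - k

theorem inner_eq (x i : Int) (js : List Int) :
    sum_of_abundant_inner x i js = if x - i ∈ js then some true else none := by
  induction js with
  | nil => simp [sum_of_abundant_inner]
  | cons j js ih =>
    simp only [sum_of_abundant_inner, ih, List.mem_cons]
    by_cases h : i + j = x
    · have hj : x - i = j := by omega
      simp [h, hj]
    · have hj : ¬ (x - i = j) := by omega
      simp [h, hj]

theorem A_eq_ref (x : Int) (nums : List Int) (k : Nat) :
    sum_of_abundant_outer x nums (PySem.List.pyRange (k : Int) (nums.length : Int) 1)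
      = refRun x nums k := by
  rw [refRun]
  by_cases hk : k < nums.length
  · rw [PySem.List.pyRange_one_cons (by exact_mod_cast hk), dif_pos hk]
    simp only [sum_of_abundant_outer, PySem.List.pyGet?_natCast,
      List.getElem?_eq_getElem hk, inner_eq, PySem.List.mem_pyRange_one]
    by_cases hgt : nums[k] > x
    · simp [hgt]
    · simp only [if_neg hgt]
      by_cases hc : (k : Int) ≤ x - k ∧ x - k < (nums.length : Int)
      · rw [if_pos hc, if_pos hc]
      · rw [if_neg hc, if_neg hc]
        rw [show ((k : Int) + 1) = ((k + 1 : Nat) : Int) by push_cast; ring]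
        exact A_eq_ref x nums (k + 1)
  · rw [PySem.List.pyRange_one_eq_nil (by exact_mod_cast Nat.le_of_not_lt hk)]
    simp [sum_of_abundant_outer, dif_neg hk]
termination_by nums.length - k

theorem B_eq_ref (x : Int) (nums : List Int) (k : Nat) :
    sum_of_abundant_alt_loop x (nums.length : Int) (PySem.List.enumerate (nums.drop k) (k : Int))
      = refRun x nums k := by
  rw [refRun]
  by_cases hk : k < nums.length
  · rw [List.drop_eq_getElem_cons hk, PySem.List.enumerate_cons, dif_pos hk]
    simp only [sum_of_abundant_alt_loop]
    by_cases hgt : nums[k] > x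
    · simp [hgt]
    · simp only [if_neg hgt]
      by_cases hc : (k : Int) ≤ x - k ∧ x - k < (nums.length : Int)
      · rw [if_pos hc, if_pos hc]
      · rw [if_neg hc, if_neg hc]
        rw [show ((k : Int) + 1) = ((k + 1 : Nat) : Int) by push_cast; ring]
        exact B_eq_ref x nums (k + 1)
  · rw [List.drop_eq_nil_of_le (Nat.le_of_not_lt hk), dif_neg hk]
    simp [sum_of_abundant_alt_loop, PySem.List.enumerate_nil]
termination_by nums.length - k

-- ===== VERDICT (by name: the statement is the Claim_ definition above) =====
theorem sum_of_abundant_spec : Claim_equal_sum_of_abundant := by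
  intro x nums _
  unfold Spec_sum_of_abundant sum_of_abundant sum_of_abundant_alt
  have hA := A_eq_ref x nums 0
  have hB := B_eq_ref x nums 0
  simp only [Nat.cast_zero, List.drop_zero] at hA hB
  rw [hA, ← hB]
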